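-- pv_equiv track=rewrite | github.com/PRKKILLER/Algorithm_Practice | Company-OA/Robinhood/PrefixString.py | solution
-- ===== SOURCE A (Python) =====
-- from typing import List
--
-- def solution(a: List[str], b: List[str]) -> bool:
--     tmp = [a[0]]
--     for i in range(1, len(a)):
--         tmp.append(tmp[i-1] + a[i])
--
--     tmp = set(tmp)
--
--     for s in b:
--         if s not in tmp:
--             return False
--
--     return True
-- ===== SOURCE B (Python) =====
-- from typing import List
--
-- def solution(a: List[str], b: List[str]) -> bool:
--     full = "".join(a)
--     lens = set()
--     t = 0
--     for x in a:
--         t += len(x)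
--         lens.add(t)
--     return all(len(s) in lens and full.startswith(s) for s in b)
-- ===== Notes on version B (the rewrite author's own statement) =====
-- stated objective: faster
-- what changed: Instead of materialising every cumulative prefix string and hashing them all into a set (quadratic in total text size), B builds the full concatenation once, records the set of boundary lengths, and tests each query by length membership plus one startswith.
import Mathlib
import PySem

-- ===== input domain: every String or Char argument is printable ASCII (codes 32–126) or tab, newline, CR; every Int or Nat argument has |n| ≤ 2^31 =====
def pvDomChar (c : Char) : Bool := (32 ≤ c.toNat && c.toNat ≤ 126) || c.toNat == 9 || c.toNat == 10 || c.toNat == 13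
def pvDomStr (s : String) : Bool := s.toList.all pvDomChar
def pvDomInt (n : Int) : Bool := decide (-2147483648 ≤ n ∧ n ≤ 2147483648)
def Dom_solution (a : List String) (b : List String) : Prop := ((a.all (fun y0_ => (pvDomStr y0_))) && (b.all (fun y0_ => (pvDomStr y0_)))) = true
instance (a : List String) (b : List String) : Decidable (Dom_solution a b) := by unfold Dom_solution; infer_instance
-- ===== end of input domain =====

-- B replaces A's quadratic list of all cumulative prefix strings by one joined string plus the
-- set of boundary lengths; each query is a length-membership test and one startswith.

-- ===== PORT A =====
-- 'for s in b: if s not in tmp: return False / return True'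
def solutionCheck (tset : PySem.Set String) : List String → Bool
  | [] => true
  | s :: rest => if PySem.Set.contains tset s then solutionCheck tset rest else false

def solution (a : List String) (b : List String) : Bool :=
  let tmp := (PySem.List.pyRange 1 (PySem.List.len a) 1).foldl
    (fun tmp i => tmp ++ [PySem.List.pyGetD tmp (i - 1) "" ++ PySem.List.pyGetD a i ""])
    [PySem.List.pyGetD a 0 ""]
  let tset := PySem.Set.ofList tmp
  solutionCheck tset b

-- ===== PORT B =====
def solution_alt (a : List String) (b : List String) : Bool :=
  let full := PySem.Str.join "" a
  let p := a.foldl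
    (fun (p : Int × PySem.Set Int) x =>
      (p.1 + PySem.Str.len x, PySem.Set.add p.2 (p.1 + PySem.Str.len x)))
    ((0 : Int), PySem.Set.empty)
  b.all (fun s => PySem.Set.contains p.2 (PySem.Str.len s) && PySem.Str.startswith full s)

-- ===== PRECONDITION & SPEC =====
-- Pre_ excludes a = [], on which A raises IndexError at a[0].
def Pre_solution (a : List String) (b : List String) : Prop := a ≠ []
instance (a : List String) (b : List String) : Decidable (Pre_solution a b) := by
  unfold Pre_solution; infer_instance

def pvWitness_solution : List String × List String := (["ab", "c"], ["ab", "abc"])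

def Spec_solution (a : List String) (b : List String) (out : Bool) : Prop := out = solution_alt a b
instance (a : List String) (b : List String) (out : Bool) : Decidable (Spec_solution a b out) := by
  unfold Spec_solution; infer_instance

-- ===== CLAIM (what is proved, stated in full; the proofs are below) =====
def Claim_equal_solution : Prop := ∀ (a : List String) (b : List String), Dom_solution a b → Pre_solution a b → Spec_solution a b (solution a b)

-- ===== LEMMAS AND PROOFS =====

/-- The prefix string of the first `k` pieces. -/
def sPref (a : List String) (k : Nat) : String := String.ofList ((a.take k).flatMap String.toList)

theorem sPref_toList (a : List String) (k : Nat) :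
    (sPref a k).toList = (a.take k).flatMap String.toList := by
  simp [sPref]

theorem sPref_succ (a : List String) (m : Nat) (h : m < a.length) :
    sPref a m ++ a[m] = sPref a (m + 1) := by
  apply String.toList_inj.mp
  have ht : a.take (m + 1) = a.take m ++ [a[m]] := by
    rw [List.take_add_one, List.getElem?_eq_getElem h]
    rfl
  rw [String.toList_append, sPref, sPref, String.toList_ofList, String.toList_ofList, ht,
    List.flatMap_append]
  simp

theorem flatten_intersperse_nil (l : List (List Char)) :
    (List.intersperse ([] : List Char) l).flatten = l.flatten := by
  induction l with
  | nil => rfl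
  | cons a t ih => cases t <;> simp_all [List.intersperse]

theorem full_toList (a : List String) :
    (PySem.Str.join "" a).toList = a.flatMap String.toList := by
  rw [PySem.Str.toList_join, PySem.Chars.join, show ("" : String).toList = [] from rfl,
    List.intercalate, flatten_intersperse_nil, ← List.flatMap_def]

/-- A's tmp after the loop over range(1, m) (for 1 ≤ m ≤ len a). -/
theorem tmp_char (a : List String) (m : Nat) (h1 : 1 ≤ m) (h2 : m ≤ a.length) :
    (PySem.List.pyRange 1 (m : Int) 1).foldl
      (fun tmp i => tmp ++ [PySem.List.pyGetD tmp (i - 1) "" ++ PySem.List.pyGetD a i ""])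
      [PySem.List.pyGetD a 0 ""]
    = (List.range m).map (fun k => sPref a (k + 1)) := by
  induction m with
  | zero => omega
  | succ m ih =>
    by_cases hm : m = 0
    · subst hm
      have h0 : 0 < a.length := by omega
      rw [show ((1 : Nat) : Int) = 1 by norm_num, PySem.List.pyRange_one_eq_nil (by omega)]
      have e0 : PySem.List.pyGetD a 0 "" = a[0] := by
        rw [PySem.List.pyGetD_eq_getElem a "" (by norm_num) (by exact_mod_cast h0)]
        rfl
      rw [List.foldl_nil, e0]
      cases a with
      | nil => simp at h0
      | cons x t =>
        simp only [List.range_succ, List.range_zero, List.nil_append, List.map_cons, List.map_nil]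
        apply congrArg (fun s => [s])
        apply String.toList_inj.mp
        rw [sPref, String.toList_ofList, show (x :: t).take 1 = [x] from rfl,
          List.flatMap_cons, List.flatMap_nil, List.append_nil]
        rfl
    · have hm1 : 1 ≤ m := by omega
      have hstep : PySem.List.pyRange 1 ((m : Int) + 1) 1
          = PySem.List.pyRange 1 (m : Int) 1 ++ [(m : Int)] :=
        PySem.List.pyRange_one_succ_right (by exact_mod_cast hm1)
      rw [show ((m + 1 : Nat) : Int) = (m : Int) + 1 by push_cast; ring, hstep,
        List.foldl_append, ih hm1 (by omega)]
      have hlen : ((List.range m).map (fun k => sPref a (k + 1))).length = m := by simp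
      have hml : m < a.length := by omega
      have e1 : PySem.List.pyGetD ((List.range m).map (fun k => sPref a (k + 1))) ((m : Int) - 1) ""
          = sPref a m := by
        rw [PySem.List.pyGetD_eq_getElem _ _ (by omega) (by rw [hlen]; exact_mod_cast (by omega : (m : Int) - 1 < (m : Int)))]
        have ht : ((m : Int) - 1).toNat = m - 1 := by omega
        simp only [ht, List.getElem_map, List.getElem_range]
        congr 1
        omega
      have e2 : PySem.List.pyGetD a (m : Int) "" = a[m] := by
        rw [PySem.List.pyGetD_ofNat a m "" hml]
      simp only [List.foldl_cons, List.foldl_nil, e1, e2, sPref_succ a m hml]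
      rw [List.range_succ, List.map_append]
      simp

/-- Membership in tset after set(tmp). -/
theorem mem_tmp (a : List String) (ha : a ≠ []) (s : String) :
    (s ∈ PySem.Set.ofList
        ((PySem.List.pyRange 1 (PySem.List.len a) 1).foldl
          (fun tmp i => tmp ++ [PySem.List.pyGetD tmp (i - 1) "" ++ PySem.List.pyGetD a i ""])
          [PySem.List.pyGetD a 0 ""]))
    ↔ ∃ k < a.length, s = sPref a (k + 1) := by
  rw [PySem.List.len_eq, tmp_char a a.length (by cases a <;> simp_all) le_rfl,
    PySem.Set.mem_ofList]
  simp [List.mem_map, eq_comm]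

/-- B's fold: membership in the boundary-length set. -/
theorem lens_mem (a : List String) (c : Int) (s : PySem.Set Int) (x : Int) :
    (x ∈ (a.foldl (fun (p : Int × PySem.Set Int) x =>
        (p.1 + PySem.Str.len x, PySem.Set.add p.2 (p.1 + PySem.Str.len x))) (c, s)).2)
    ↔ x ∈ s ∨ ∃ k < a.length, x = c + (((a.take (k + 1)).flatMap String.toList).length : Int) := by
  induction a generalizing c s with
  | nil => simp
  | cons hd tl ih =>
    rw [List.foldl_cons, ih, PySem.Set.mem_add]
    simp only [PySem.Str.len_eq]
    constructor
    · rintro ((h | h) | ⟨k, hk, rfl⟩)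
      · exact Or.inl h
      · exact Or.inr ⟨0, by simp, by simp [h]⟩
      · refine Or.inr ⟨k + 1, by simpa using hk, ?_⟩
        simp [List.take_succ_cons]
        ring
    · rintro (h | ⟨k, hk, rfl⟩)
      · exact Or.inl (Or.inl h)
      · cases k with
        | zero => exact Or.inl (Or.inr (by simp))
        | succ j =>
          refine Or.inr ⟨j, by simpa using hk, ?_⟩
          simp [List.take_succ_cons]
          ring

theorem prefix_unique {p q l : List Char} (hp : p <+: l) (hq : q <+: l)
    (h : p.length = q.length) : p = q := by
  rw [List.prefix_iff_eq_take] at hp hq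
  rw [hp, hq, h]

/-- pointwise: s ∈ tmp-set ↔ B's test. -/
theorem point_iff (a : List String) (s : String) :
    (∃ k < a.length, s = sPref a (k + 1))
    ↔ ((∃ k < a.length,
          (s.toList.length : Int) = (((a.take (k + 1)).flatMap String.toList).length : Int))
        ∧ s.toList <+: a.flatMap String.toList) := by
  constructor
  · rintro ⟨k, hk, rfl⟩
    refine ⟨⟨k, hk, by simp [sPref_toList]⟩, ?_⟩
    rw [sPref_toList]
    exact ⟨(a.drop (k + 1)).flatMap String.toList,
      by rw [← List.flatMap_append, List.take_append_drop]⟩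
  · rintro ⟨⟨k, hk, hlen⟩, hpre⟩
    refine ⟨k, hk, ?_⟩
    apply String.toList_inj.mp
    rw [sPref_toList]
    refine prefix_unique hpre ?_ (by exact_mod_cast hlen)
    exact ⟨(a.drop (k + 1)).flatMap String.toList,
      by rw [← List.flatMap_append, List.take_append_drop]⟩

theorem all_congr_pv {α : Type} {l : List α} {p q : α → Bool} (h : ∀ x ∈ l, p x = q x) :
    l.all p = l.all q := by
  induction l with
  | nil => rfl
  | cons x t ih => simp_all

theorem solutionCheck_eq_all (tset : PySem.Set String) (b : List String) :
    solutionCheck tset b = b.all (fun s => PySem.Set.contains tset s) := by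
  induction b with
  | nil => rfl
  | cons s rest ih => by_cases h : PySem.Set.contains tset s <;> simp [solutionCheck, ih]

-- ===== VERDICT (by name: the statement is the Claim_ definition above) =====
theorem solution_spec : Claim_equal_solution := by
  intro a b _ ha
  unfold Spec_solution solution solution_alt
  rw [solutionCheck_eq_all]
  apply all_congr_pv
  intro s _
  rw [Bool.eq_iff_iff]
  rw [PySem.Set.contains_iff, mem_tmp a ha s, point_iff a s]
  rw [Bool.and_eq_true, PySem.Set.contains_iff, lens_mem]
  simp only [PySem.Str.startswith_eq, PySem.Chars.startswith_iff, full_toList, PySem.Str.len_eq]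
  constructor
  · rintro ⟨⟨k, hk, h⟩, hp⟩
    exact ⟨Or.inr ⟨k, hk, by omega⟩, hp⟩
  · rintro ⟨h | ⟨k, hk, h⟩, hp⟩
    · exact absurd h (by simp [PySem.Set.empty])
    · exact ⟨⟨k, hk, by omega⟩, hp⟩
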